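-- pv_equiv track=rewrite | github.com/noolex/sonic-mgmt-framework | CLI/actioner/show_config_crm.py | show_crm_config
-- ===== SOURCE A (Python) =====
-- cfgmap = {
--     'polling_interval'                    : 'crm polling interval',
--     'acl_group_threshold_type'            : 'crm thresholds acl group type',
--     'acl_group_high_threshold'            : 'crm thresholds acl group high',
--     'acl_group_low_threshold'             : 'crm thresholds acl group low',
--     'acl_counter_threshold_type'          : 'crm thresholds acl group counter type',
--     'acl_counter_high_threshold'          : 'crm thresholds acl group counter high',
--     'acl_counter_low_threshold'           : 'crm thresholds acl group counter low',
--     'acl_entry_threshold_type'            : 'crm thresholds acl group entry type',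
--     'acl_entry_high_threshold'            : 'crm thresholds acl group entry high',
--     'acl_entry_low_threshold'             : 'crm thresholds acl group entry low',
--     'acl_table_threshold_type'            : 'crm thresholds acl table type',
--     'acl_table_high_threshold'            : 'crm thresholds acl table high',
--     'acl_table_low_threshold'             : 'crm thresholds acl table low',
--     'dnat_entry_threshold_type'           : 'crm thresholds dnat type',
--     'dnat_entry_high_threshold'           : 'crm thresholds dnat high',
--     'dnat_entry_low_threshold'            : 'crm thresholds dnat low',
--     'fdb_entry_threshold_type'            : 'crm thresholds fdb type',
--     'fdb_entry_high_threshold'            : 'crm thresholds fdb high',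
--     'fdb_entry_low_threshold'             : 'crm thresholds fdb low',
--     'ipmc_entry_threshold_type'           : 'crm thresholds ipmc type',
--     'ipmc_entry_high_threshold'           : 'crm thresholds ipmc high',
--     'ipmc_entry_low_threshold'            : 'crm thresholds ipmc low',
--     'ipv4_neighbor_threshold_type'        : 'crm thresholds ipv4 neighbor type',
--     'ipv4_neighbor_high_threshold'        : 'crm thresholds ipv4 neighbor high',
--     'ipv4_neighbor_low_threshold'         : 'crm thresholds ipv4 neighbor low',
--     'ipv4_nexthop_threshold_type'         : 'crm thresholds ipv4 nexthop type',
--     'ipv4_nexthop_high_threshold'         : 'crm thresholds ipv4 nexthop high',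
--     'ipv4_nexthop_low_threshold'          : 'crm thresholds ipv4 nexthop low',
--     'ipv4_route_threshold_type'           : 'crm thresholds ipv4 route type',
--     'ipv4_route_high_threshold'           : 'crm thresholds ipv4 route high',
--     'ipv4_route_low_threshold'            : 'crm thresholds ipv4 route low',
--     'ipv6_neighbor_threshold_type'        : 'crm thresholds ipv6 neighbor type',
--     'ipv6_neighbor_high_threshold'        : 'crm thresholds ipv6 neighbor high',
--     'ipv6_neighbor_low_threshold'         : 'crm thresholds ipv6 neighbor low',
--     'ipv6_nexthop_threshold_type'         : 'crm thresholds ipv6 nexthop type',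
--     'ipv6_nexthop_high_threshold'         : 'crm thresholds ipv6 nexthop high',
--     'ipv6_nexthop_low_threshold'          : 'crm thresholds ipv6 nexthop low',
--     'ipv6_route_threshold_type'           : 'crm thresholds ipv6 route type',
--     'ipv6_route_high_threshold'           : 'crm thresholds ipv6 route high',
--     'ipv6_route_low_threshold'            : 'crm thresholds ipv6 route low',
--     'nexthop_group_member_threshold_type' : 'crm thresholds nexthop group member type',
--     'nexthop_group_member_high_threshold' : 'crm thresholds nexthop group member high',
--     'nexthop_group_member_low_threshold'  : 'crm thresholds nexthop group member low',
--     'nexthop_group_threshold_type'        : 'crm thresholds nexthop group object type',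
--     'nexthop_group_high_threshold'        : 'crm thresholds nexthop group object high',
--     'nexthop_group_low_threshold'         : 'crm thresholds nexthop group object low',
--     'snat_entry_threshold_type'           : 'crm thresholds snat type',
--     'snat_entry_high_threshold'           : 'crm thresholds snat high',
--     'snat_entry_low_threshold'            : 'crm thresholds snat low'
-- }
--
-- def get_crm_config(info, field, prefix):
--     cfg_str = ""
--     if field in info:
--         cfg_str = "{0} {1}".format(prefix, info[field])
--     return cfg_str
--
-- def show_crm_config(render_tables):
--     info = {}
--     conf = []
--
--     # skip if render_tables is None
--     if render_tables is None:
--         return 'CB_SUCCESS', ''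
--
--     if 'sonic-system-crm:sonic-system-crm/CRM' in render_tables:
--         if 'CRM_LIST' in render_tables['sonic-system-crm:sonic-system-crm/CRM']:
--             info = render_tables['sonic-system-crm:sonic-system-crm/CRM']['CRM_LIST'][0]
--
--     # skip if render_tables['sonic-system-crm:sonic-system-crm/CRM']['CRM_LIST'][0] is not available
--     if not info:
--         return 'CB_SUCCESS', ''
--
--     # sort dictionary by value (i.e. config command)
--     for field, prefix in sorted(cfgmap.items(), key=lambda x: x[1]):
--         cmd = get_crm_config(info, field, prefix)
--         if len(cmd) > 0:
--             conf.append(cmd)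
--
--     return 'CB_SUCCESS', "\n".join(conf)
-- ===== SOURCE B (Python) =====
-- cfgmap = {
--     'polling_interval'                    : 'crm polling interval',
--     'acl_group_threshold_type'            : 'crm thresholds acl group type',
--     'acl_group_high_threshold'            : 'crm thresholds acl group high',
--     'acl_group_low_threshold'             : 'crm thresholds acl group low',
--     'acl_counter_threshold_type'          : 'crm thresholds acl group counter type',
--     'acl_counter_high_threshold'          : 'crm thresholds acl group counter high',
--     'acl_counter_low_threshold'           : 'crm thresholds acl group counter low',
--     'acl_entry_threshold_type'            : 'crm thresholds acl group entry type',
--     'acl_entry_high_threshold'            : 'crm thresholds acl group entry high',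
--     'acl_entry_low_threshold'             : 'crm thresholds acl group entry low',
--     'acl_table_threshold_type'            : 'crm thresholds acl table type',
--     'acl_table_high_threshold'            : 'crm thresholds acl table high',
--     'acl_table_low_threshold'             : 'crm thresholds acl table low',
--     'dnat_entry_threshold_type'           : 'crm thresholds dnat type',
--     'dnat_entry_high_threshold'           : 'crm thresholds dnat high',
--     'dnat_entry_low_threshold'            : 'crm thresholds dnat low',
--     'fdb_entry_threshold_type'            : 'crm thresholds fdb type',
--     'fdb_entry_high_threshold'            : 'crm thresholds fdb high',
--     'fdb_entry_low_threshold'             : 'crm thresholds fdb low',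
--     'ipmc_entry_threshold_type'           : 'crm thresholds ipmc type',
--     'ipmc_entry_high_threshold'           : 'crm thresholds ipmc high',
--     'ipmc_entry_low_threshold'            : 'crm thresholds ipmc low',
--     'ipv4_neighbor_threshold_type'        : 'crm thresholds ipv4 neighbor type',
--     'ipv4_neighbor_high_threshold'        : 'crm thresholds ipv4 neighbor high',
--     'ipv4_neighbor_low_threshold'         : 'crm thresholds ipv4 neighbor low',
--     'ipv4_nexthop_threshold_type'         : 'crm thresholds ipv4 nexthop type',
--     'ipv4_nexthop_high_threshold'         : 'crm thresholds ipv4 nexthop high',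
--     'ipv4_nexthop_low_threshold'          : 'crm thresholds ipv4 nexthop low',
--     'ipv4_route_threshold_type'           : 'crm thresholds ipv4 route type',
--     'ipv4_route_high_threshold'           : 'crm thresholds ipv4 route high',
--     'ipv4_route_low_threshold'            : 'crm thresholds ipv4 route low',
--     'ipv6_neighbor_threshold_type'        : 'crm thresholds ipv6 neighbor type',
--     'ipv6_neighbor_high_threshold'        : 'crm thresholds ipv6 neighbor high',
--     'ipv6_neighbor_low_threshold'         : 'crm thresholds ipv6 neighbor low',
--     'ipv6_nexthop_threshold_type'         : 'crm thresholds ipv6 nexthop type',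
--     'ipv6_nexthop_high_threshold'         : 'crm thresholds ipv6 nexthop high',
--     'ipv6_nexthop_low_threshold'          : 'crm thresholds ipv6 nexthop low',
--     'ipv6_route_threshold_type'           : 'crm thresholds ipv6 route type',
--     'ipv6_route_high_threshold'           : 'crm thresholds ipv6 route high',
--     'ipv6_route_low_threshold'            : 'crm thresholds ipv6 route low',
--     'nexthop_group_member_threshold_type' : 'crm thresholds nexthop group member type',
--     'nexthop_group_member_high_threshold' : 'crm thresholds nexthop group member high',
--     'nexthop_group_member_low_threshold'  : 'crm thresholds nexthop group member low',
--     'nexthop_group_threshold_type'        : 'crm thresholds nexthop group object type',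
--     'nexthop_group_high_threshold'        : 'crm thresholds nexthop group object high',
--     'nexthop_group_low_threshold'         : 'crm thresholds nexthop group object low',
--     'snat_entry_threshold_type'           : 'crm thresholds snat type',
--     'snat_entry_high_threshold'           : 'crm thresholds snat high',
--     'snat_entry_low_threshold'            : 'crm thresholds snat low'
-- }
--
--
-- def show_crm_config(render_tables):
--     if render_tables is None:
--         return 'CB_SUCCESS', ''
--     crm_list = render_tables.get('sonic-system-crm:sonic-system-crm/CRM', {}).get('CRM_LIST', [])
--     info = crm_list[0] if crm_list else {}
--     # drive the loop by the configured data itself: one lookup into cfgmap per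
--     # configured field, then sort the finished command lines
--     conf = sorted('{0} {1}'.format(cfgmap[field], value)
--                   for field, value in info.items() if field in cfgmap)
--     return 'CB_SUCCESS', '\n'.join(conf)
-- ===== Notes on version B (the rewrite author's own statement) =====
-- stated objective: alternative
-- what changed: B inverts the join direction: instead of pre-sorting the 49-entry cfgmap and scanning it against the input dict, B iterates over the input dict's own items, looks each field up in cfgmap, builds the command lines and sorts the finished lines; correct because cfgmap's command prefixes are pairwise distinct and none is a string-prefix of another, so sorting whole lines equals A's sort by prefix.
-- crash fix: When CRM_LIST maps to an empty list A raises IndexError on [0]; B treats it as no configuration and returns ('CB_SUCCESS', ''). — e.g. on show_crm_config(some [("sonic-system-crm:sonic-system-crm/CRM", [("CRM_LIST", [])])]): A raises IndexError, B returns ("CB_SUCCESS", "")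
import Mathlib
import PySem

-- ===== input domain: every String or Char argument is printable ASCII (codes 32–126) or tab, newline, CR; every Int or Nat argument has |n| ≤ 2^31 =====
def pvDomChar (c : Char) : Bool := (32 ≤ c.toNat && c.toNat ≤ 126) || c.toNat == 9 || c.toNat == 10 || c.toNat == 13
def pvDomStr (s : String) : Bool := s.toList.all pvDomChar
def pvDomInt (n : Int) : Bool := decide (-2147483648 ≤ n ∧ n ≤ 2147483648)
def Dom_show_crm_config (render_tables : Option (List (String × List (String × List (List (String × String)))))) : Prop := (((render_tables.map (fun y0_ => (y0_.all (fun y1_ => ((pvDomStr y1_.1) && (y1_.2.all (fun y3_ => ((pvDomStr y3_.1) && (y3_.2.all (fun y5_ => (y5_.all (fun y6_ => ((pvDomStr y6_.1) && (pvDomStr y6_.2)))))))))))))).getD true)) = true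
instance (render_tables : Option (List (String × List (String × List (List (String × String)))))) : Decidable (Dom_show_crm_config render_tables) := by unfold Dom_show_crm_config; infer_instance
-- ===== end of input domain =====

-- B inverts the join: instead of scanning the pre-sorted 49-entry cfgmap against the input dict,
-- it iterates the input dict's items, looks each field up in cfgmap, and sorts the finished
-- command lines (objective: alternative).

-- ===== PORT A =====
-- the module-level constant cfgmap (a dict literal), shared by both programs
def pv_cfgmap : List (String × String) := [
  ("polling_interval", "crm polling interval"),
  ("acl_group_threshold_type", "crm thresholds acl group type"),
  ("acl_group_high_threshold", "crm thresholds acl group high"),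
  ("acl_group_low_threshold", "crm thresholds acl group low"),
  ("acl_counter_threshold_type", "crm thresholds acl group counter type"),
  ("acl_counter_high_threshold", "crm thresholds acl group counter high"),
  ("acl_counter_low_threshold", "crm thresholds acl group counter low"),
  ("acl_entry_threshold_type", "crm thresholds acl group entry type"),
  ("acl_entry_high_threshold", "crm thresholds acl group entry high"),
  ("acl_entry_low_threshold", "crm thresholds acl group entry low"),
  ("acl_table_threshold_type", "crm thresholds acl table type"),
  ("acl_table_high_threshold", "crm thresholds acl table high"),
  ("acl_table_low_threshold", "crm thresholds acl table low"),
  ("dnat_entry_threshold_type", "crm thresholds dnat type"),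
  ("dnat_entry_high_threshold", "crm thresholds dnat high"),
  ("dnat_entry_low_threshold", "crm thresholds dnat low"),
  ("fdb_entry_threshold_type", "crm thresholds fdb type"),
  ("fdb_entry_high_threshold", "crm thresholds fdb high"),
  ("fdb_entry_low_threshold", "crm thresholds fdb low"),
  ("ipmc_entry_threshold_type", "crm thresholds ipmc type"),
  ("ipmc_entry_high_threshold", "crm thresholds ipmc high"),
  ("ipmc_entry_low_threshold", "crm thresholds ipmc low"),
  ("ipv4_neighbor_threshold_type", "crm thresholds ipv4 neighbor type"),
  ("ipv4_neighbor_high_threshold", "crm thresholds ipv4 neighbor high"),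
  ("ipv4_neighbor_low_threshold", "crm thresholds ipv4 neighbor low"),
  ("ipv4_nexthop_threshold_type", "crm thresholds ipv4 nexthop type"),
  ("ipv4_nexthop_high_threshold", "crm thresholds ipv4 nexthop high"),
  ("ipv4_nexthop_low_threshold", "crm thresholds ipv4 nexthop low"),
  ("ipv4_route_threshold_type", "crm thresholds ipv4 route type"),
  ("ipv4_route_high_threshold", "crm thresholds ipv4 route high"),
  ("ipv4_route_low_threshold", "crm thresholds ipv4 route low"),
  ("ipv6_neighbor_threshold_type", "crm thresholds ipv6 neighbor type"),
  ("ipv6_neighbor_high_threshold", "crm thresholds ipv6 neighbor high"),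
  ("ipv6_neighbor_low_threshold", "crm thresholds ipv6 neighbor low"),
  ("ipv6_nexthop_threshold_type", "crm thresholds ipv6 nexthop type"),
  ("ipv6_nexthop_high_threshold", "crm thresholds ipv6 nexthop high"),
  ("ipv6_nexthop_low_threshold", "crm thresholds ipv6 nexthop low"),
  ("ipv6_route_threshold_type", "crm thresholds ipv6 route type"),
  ("ipv6_route_high_threshold", "crm thresholds ipv6 route high"),
  ("ipv6_route_low_threshold", "crm thresholds ipv6 route low"),
  ("nexthop_group_member_threshold_type", "crm thresholds nexthop group member type"),
  ("nexthop_group_member_high_threshold", "crm thresholds nexthop group member high"),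
  ("nexthop_group_member_low_threshold", "crm thresholds nexthop group member low"),
  ("nexthop_group_threshold_type", "crm thresholds nexthop group object type"),
  ("nexthop_group_high_threshold", "crm thresholds nexthop group object high"),
  ("nexthop_group_low_threshold", "crm thresholds nexthop group object low"),
  ("snat_entry_threshold_type", "crm thresholds snat type"),
  ("snat_entry_high_threshold", "crm thresholds snat high"),
  ("snat_entry_low_threshold", "crm thresholds snat low")]

def get_crm_config (info : List (String × String)) (field : String) (pfx : String) : String :=
  -- cfg_str = ""; if field in info: cfg_str = "{0} {1}".format(prefix, info[field]); return cfg_str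
  match List.lookup field info with
  | some v => pfx ++ " " ++ v
  | none => ""

def show_crm_config (render_tables : Option (List (String × List (String × List (List (String × String)))))) : String × String :=
  match render_tables with
  | none => ("CB_SUCCESS", "")
  | some rts =>
    let info : List (String × String) :=
      match List.lookup "sonic-system-crm:sonic-system-crm/CRM" rts with
      | some crm =>
        match List.lookup "CRM_LIST" crm with
        | some lst => (PySem.List.pyGet? lst 0).getD []   -- lst[0]; none = IndexError, excluded by Pre_
        | none => []
      | none => []
    if info = [] then ("CB_SUCCESS", "")
    else
      let conf := (PySem.List.sorted pv_cfgmap (fun x => x.2) false).foldl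
        (fun conf fp =>
          let cmd := get_crm_config info fp.1 fp.2
          if 0 < PySem.Str.len cmd then conf ++ [cmd] else conf) []
      ("CB_SUCCESS", PySem.Str.join "\n" conf)

-- ===== PORT B =====
def show_crm_config_alt (render_tables : Option (List (String × List (String × List (List (String × String)))))) : String × String :=
  match render_tables with
  | none => ("CB_SUCCESS", "")
  | some rts =>
    let crm_list : List (List (String × String)) :=
      match List.lookup "sonic-system-crm:sonic-system-crm/CRM" rts with
      | some crm => (List.lookup "CRM_LIST" crm).getD []
      | none => []
    let info : List (String × String) :=
      match crm_list with
      | x :: _ => x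
      | [] => []
    -- sorted(cfgmap[field] + ' ' + value for field, value in info.items() if field in cfgmap)
    -- ('field in cfgmap' then 'cfgmap[field]' = one first-match lookup)
    let conf := PySem.List.sorted
      (info.filterMap (fun kv => (List.lookup kv.1 pv_cfgmap).map (fun p => p ++ " " ++ kv.2)))
      (fun x => x) false
    ("CB_SUCCESS", PySem.Str.join "\n" conf)

-- ===== PRECONDITION & SPEC =====
-- duplicate keys at any dict level (not representable as a Python dict; first- vs last-value is
-- representation-dependent in the association-list encoding)
def pvKeysOK (rts : List (String × List (String × List (List (String × String))))) : Prop :=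
  (rts.map Prod.fst).Nodup ∧
    ∀ p ∈ rts, (p.2.map Prod.fst).Nodup ∧ ∀ q ∈ p.2, ∀ d ∈ q.2, (d.map Prod.fst).Nodup

-- Pre_ excludes association lists with duplicate keys at any dict level (a Python dict cannot carry
-- them, so their lookup value is representation-dependent) and inputs whose CRM_LIST value is the
-- empty list, on which A raises IndexError at [0].
def Pre_show_crm_config (render_tables : Option (List (String × List (String × List (List (String × String)))))) : Prop :=
  pvKeysOK (render_tables.getD []) ∧
    ∀ p ∈ render_tables.getD [], p.1 = "sonic-system-crm:sonic-system-crm/CRM" →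
      ∀ q ∈ p.2, q.1 = "CRM_LIST" → q.2 ≠ []

instance (render_tables : Option (List (String × List (String × List (List (String × String)))))) : Decidable (Pre_show_crm_config render_tables) := by unfold Pre_show_crm_config pvKeysOK; infer_instance

def pvWitness_show_crm_config : (Option (List (String × List (String × List (List (String × String)))))) :=
  some [("sonic-system-crm:sonic-system-crm/CRM", [("CRM_LIST", [[("polling_interval", "300")]])])]

-- When CRM_LIST maps to the empty list, A raises IndexError on [0]; B treats it as no configuration
-- and returns ('CB_SUCCESS', '').
def Raises_show_crm_config (render_tables : Option (List (String × List (String × List (List (String × String)))))) : Prop :=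
  render_tables ≠ none ∧
    (∃ p ∈ render_tables.getD [], p.1 = "sonic-system-crm:sonic-system-crm/CRM") ∧
    ∀ p ∈ render_tables.getD [], p.1 = "sonic-system-crm:sonic-system-crm/CRM" →
        (∃ q ∈ p.2, q.1 = "CRM_LIST") ∧
          ∀ q ∈ p.2, q.1 = "CRM_LIST" → q.2 = []

instance (render_tables : Option (List (String × List (String × List (List (String × String)))))) : Decidable (Raises_show_crm_config render_tables) := by unfold Raises_show_crm_config; infer_instance

def pvRaiseWitness_show_crm_config : (Option (List (String × List (String × List (List (String × String)))))) :=
  some [("sonic-system-crm:sonic-system-crm/CRM", [("CRM_LIST", [])])]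

def pvRaiseWitnessOut_show_crm_config : String × String := ("CB_SUCCESS", "")

def Spec_show_crm_config (render_tables : Option (List (String × List (String × List (List (String × String)))))) (out : String × String) : Prop := out = show_crm_config_alt render_tables
instance (render_tables : Option (List (String × List (String × List (List (String × String)))))) (out : String × String) : Decidable (Spec_show_crm_config render_tables out) := by unfold Spec_show_crm_config; infer_instance

-- ===== CLAIM (what is proved, stated in full; the proofs are below) =====
def Claim_equal_show_crm_config : Prop := ∀ (render_tables : Option (List (String × List (String × List (List (String × String)))))), Dom_show_crm_config render_tables → Pre_show_crm_config render_tables → Spec_show_crm_config render_tables (show_crm_config render_tables)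

def Claim_raises_show_crm_config : Prop := (∀ (render_tables : Option (List (String × List (String × List (List (String × String)))))), Dom_show_crm_config render_tables → Raises_show_crm_config render_tables → ¬ Pre_show_crm_config render_tables) ∧ (Dom_show_crm_config (pvRaiseWitness_show_crm_config) ∧ Raises_show_crm_config (pvRaiseWitness_show_crm_config) ∧ show_crm_config_alt (pvRaiseWitness_show_crm_config) = pvRaiseWitnessOut_show_crm_config)

-- ===== LEMMAS AND PROOFS =====
-- pvDiffB a b: a and b differ at some position at which both are still defined, and there a's
-- character is smaller — so ANY extensions a++u, b++v are lexicographically ordered.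
def pvDiffB : List Char → List Char → Bool
  | a :: as, b :: bs => if a = b then pvDiffB as bs else decide (a < b)
  | _, _ => false

theorem pvDiffB_lex : ∀ (a b u v : List Char), pvDiffB a b = true → List.Lex (· < ·) (a ++ u) (b ++ v)
  | x :: as, y :: bs, u, v, h => by
    by_cases hxy : x = y
    · subst hxy
      exact List.Lex.cons (pvDiffB_lex as bs u v (by simpa [pvDiffB] using h))
    · exact List.Lex.rel (by simpa [pvDiffB, hxy] using h)

theorem pvDiffB_str {p q : String} (h : pvDiffB p.toList q.toList = true) (u v : String) :
    p ++ u < q ++ v := by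
  refine String.lt_iff_toList_lt.mpr ?_
  simp only [String.toList_append]
  exact (List.lt_iff_lex_lt _ _).mpr (pvDiffB_lex _ _ _ _ h)

-- cfgmap sorted by value, as a literal
def pvSortedCfg : List (String × String) := [
  ("polling_interval", "crm polling interval"),
  ("acl_counter_high_threshold", "crm thresholds acl group counter high"),
  ("acl_counter_low_threshold", "crm thresholds acl group counter low"),
  ("acl_counter_threshold_type", "crm thresholds acl group counter type"),
  ("acl_entry_high_threshold", "crm thresholds acl group entry high"),
  ("acl_entry_low_threshold", "crm thresholds acl group entry low"),
  ("acl_entry_threshold_type", "crm thresholds acl group entry type"),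
  ("acl_group_high_threshold", "crm thresholds acl group high"),
  ("acl_group_low_threshold", "crm thresholds acl group low"),
  ("acl_group_threshold_type", "crm thresholds acl group type"),
  ("acl_table_high_threshold", "crm thresholds acl table high"),
  ("acl_table_low_threshold", "crm thresholds acl table low"),
  ("acl_table_threshold_type", "crm thresholds acl table type"),
  ("dnat_entry_high_threshold", "crm thresholds dnat high"),
  ("dnat_entry_low_threshold", "crm thresholds dnat low"),
  ("dnat_entry_threshold_type", "crm thresholds dnat type"),
  ("fdb_entry_high_threshold", "crm thresholds fdb high"),
  ("fdb_entry_low_threshold", "crm thresholds fdb low"),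
  ("fdb_entry_threshold_type", "crm thresholds fdb type"),
  ("ipmc_entry_high_threshold", "crm thresholds ipmc high"),
  ("ipmc_entry_low_threshold", "crm thresholds ipmc low"),
  ("ipmc_entry_threshold_type", "crm thresholds ipmc type"),
  ("ipv4_neighbor_high_threshold", "crm thresholds ipv4 neighbor high"),
  ("ipv4_neighbor_low_threshold", "crm thresholds ipv4 neighbor low"),
  ("ipv4_neighbor_threshold_type", "crm thresholds ipv4 neighbor type"),
  ("ipv4_nexthop_high_threshold", "crm thresholds ipv4 nexthop high"),
  ("ipv4_nexthop_low_threshold", "crm thresholds ipv4 nexthop low"),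
  ("ipv4_nexthop_threshold_type", "crm thresholds ipv4 nexthop type"),
  ("ipv4_route_high_threshold", "crm thresholds ipv4 route high"),
  ("ipv4_route_low_threshold", "crm thresholds ipv4 route low"),
  ("ipv4_route_threshold_type", "crm thresholds ipv4 route type"),
  ("ipv6_neighbor_high_threshold", "crm thresholds ipv6 neighbor high"),
  ("ipv6_neighbor_low_threshold", "crm thresholds ipv6 neighbor low"),
  ("ipv6_neighbor_threshold_type", "crm thresholds ipv6 neighbor type"),
  ("ipv6_nexthop_high_threshold", "crm thresholds ipv6 nexthop high"),
  ("ipv6_nexthop_low_threshold", "crm thresholds ipv6 nexthop low"),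
  ("ipv6_nexthop_threshold_type", "crm thresholds ipv6 nexthop type"),
  ("ipv6_route_high_threshold", "crm thresholds ipv6 route high"),
  ("ipv6_route_low_threshold", "crm thresholds ipv6 route low"),
  ("ipv6_route_threshold_type", "crm thresholds ipv6 route type"),
  ("nexthop_group_member_high_threshold", "crm thresholds nexthop group member high"),
  ("nexthop_group_member_low_threshold", "crm thresholds nexthop group member low"),
  ("nexthop_group_member_threshold_type", "crm thresholds nexthop group member type"),
  ("nexthop_group_high_threshold", "crm thresholds nexthop group object high"),
  ("nexthop_group_low_threshold", "crm thresholds nexthop group object low"),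
  ("nexthop_group_threshold_type", "crm thresholds nexthop group object type"),
  ("snat_entry_high_threshold", "crm thresholds snat high"),
  ("snat_entry_low_threshold", "crm thresholds snat low"),
  ("snat_entry_threshold_type", "crm thresholds snat type")]

set_option maxHeartbeats 1000000 in
theorem pvSorted_perm : pvSortedCfg.Perm pv_cfgmap := by decide

set_option maxHeartbeats 1000000 in
theorem pvSorted_diffB : pvSortedCfg.Pairwise (fun a b => pvDiffB a.2.toList b.2.toList = true) := by
  decide

set_option maxHeartbeats 1000000 in
theorem pvCfg_keys_nodup : (pv_cfgmap.map Prod.fst).Nodup := by decide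

theorem pvSorted_eq : PySem.List.sorted pv_cfgmap (fun x => x.2) false = pvSortedCfg := by
  refine PySem.List.sorted_eq_of_perm_of_pairwise_lt _ _ _ pvSorted_perm ?_
  refine pvSorted_diffB.imp ?_
  intro a b h
  have := pvDiffB_str h "" ""
  simpa using this

def pvLine (info : List (String × String)) (fp : String × String) : Option String :=
  (List.lookup fp.1 info).map (fun v => fp.2 ++ " " ++ v)

-- A's guarded-append loop (with its `let cmd`) over any list, for an abstract line builder g
theorem loopA {α : Type} (g : α → String) :
    ∀ (l : List α) (acc : List String),
      l.foldl (fun conf x =>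
          let cmd := g x
          if 0 < PySem.Str.len cmd then conf ++ [cmd] else conf) acc
        = acc ++ l.filterMap (fun x => if 0 < PySem.Str.len (g x) then some (g x) else none)
  | [], acc => by simp
  | x :: l, acc => by
    simp only [List.foldl_cons, List.filterMap_cons]
    by_cases hx : 0 < PySem.Str.len (g x)
    · rw [if_pos hx, if_pos hx, loopA g l (acc ++ [g x])]
      simp
    · rw [if_neg hx, if_neg hx, loopA g l acc]

theorem line_eq (info : List (String × String)) (fp : String × String) :
    (if 0 < PySem.Str.len (get_crm_config info fp.1 fp.2) then some (get_crm_config info fp.1 fp.2)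
      else none) = pvLine info fp := by
  cases hl : List.lookup fp.1 info with
  | none => simp [get_crm_config, pvLine, hl, PySem.Str.len]
  | some v =>
    have hone : (" " : String).toList.length = 1 := rfl
    have hlen : 0 < PySem.Str.len (fp.2 ++ " " ++ v) := by
      simp only [PySem.Str.len, String.toList_append, List.length_append, hone]
      omega
    simp only [get_crm_config, pvLine, hl, Option.map_some]
    rw [if_pos hlen]

-- List.lookup basics (first-match association-list lookup)
theorem pv_mem_of_lookup {β : Type} {a : String} {v : β} :
    ∀ {l : List (String × β)}, List.lookup a l = some v → (a, v) ∈ l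
  | (k, w) :: t, h => by
    by_cases hk : a = k
    · subst hk
      simp [List.lookup] at h
      subst h
      exact List.mem_cons_self
    · have hb : (a == k) = false := by simp [hk]
      have : List.lookup a t = some v := by simpa [List.lookup, hb] using h
      exact List.mem_cons_of_mem _ (pv_mem_of_lookup this)

theorem pv_lookup_none {β : Type} {a : String} :
    ∀ {l : List (String × β)}, a ∉ l.map Prod.fst → List.lookup a l = none
  | [], _ => rfl
  | (k, w) :: t, h => by
    simp only [List.map_cons, List.mem_cons] at h
    push Not at h
    have hb : (a == k) = false := by simp [h.1]
    simp [List.lookup, hb, pv_lookup_none (l := t) h.2]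

-- pulling the (unique, if any) entry with key f out of a filterMap over a nodup-keyed list
theorem pv_extract (f : String) (A : String → String) (B : String × String → Option String) :
    ∀ (info : List (String × String)), (info.map Prod.fst).Nodup →
      (info.filterMap (fun kv => if kv.1 = f then some (A kv.2) else B kv)).Perm
        ((match List.lookup f info with | some v => [A v] | none => []) ++
          info.filterMap (fun kv => if kv.1 = f then none else B kv))
  | [], _ => by simp [List.lookup]
  | (k, w) :: t, hnd => by
    simp only [List.map_cons, List.nodup_cons] at hnd
    obtain ⟨hk, hndt⟩ := hnd
    by_cases hkf : k = f
    · subst hkf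
      have hlt : ∀ kv ∈ t, (if kv.1 = k then some (A kv.2) else B kv)
          = (if kv.1 = k then none else B kv) := by
        intro kv hm
        have : kv.1 ≠ k := fun he => hk (he ▸ List.mem_map_of_mem hm)
        simp [this]
      simp only [List.filterMap_cons, List.lookup, beq_self_eq_true]
      rw [List.filterMap_congr hlt]
      simp
    · have hbeq : (f == k) = false := by simp [Ne.symm hkf]
      simp only [List.filterMap_cons, List.lookup, hbeq, if_neg hkf]
      cases hB : B (k, w) with
      | none => exact pv_extract f A B t hndt
      | some b =>
        refine ((pv_extract f A B t hndt).cons b).trans ?_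
        cases hl : List.lookup f t with
        | none => simp
        | some v => simpa using (List.perm_middle (a := b) (l₁ := [A v])
            (l₂ := t.filterMap (fun kv => if kv.1 = f then none else B kv))).symm

-- join commutation: scanning the map against the dict = scanning the dict against the map,
-- up to permutation, when both key lists are duplicate-free
theorem pv_join (g : String → String → String → String) :
    ∀ (m info : List (String × String)),
      (m.map Prod.fst).Nodup → (info.map Prod.fst).Nodup →
      (m.filterMap (fun fp => (List.lookup fp.1 info).map (fun v => g fp.1 fp.2 v))).Perm
        (info.filterMap (fun kv => (List.lookup kv.1 m).map (fun p => g kv.1 p kv.2)))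
  | [], info, _, _ => by
    simp [List.lookup]
  | (f, p) :: m', info, hm, hinfo => by
    simp only [List.map_cons, List.nodup_cons] at hm
    obtain ⟨hf, hm'⟩ := hm
    have hrw : ∀ kv ∈ info,
        (List.lookup kv.1 ((f, p) :: m')).map (fun p' => g kv.1 p' kv.2)
          = (if kv.1 = f then some (g f p kv.2)
             else (List.lookup kv.1 m').map (fun p' => g kv.1 p' kv.2)) := by
      intro kv _
      by_cases h : kv.1 = f
      · simp [List.lookup, h]
      · have hb : (kv.1 == f) = false := by simp [h]
        simp [List.lookup, hb, h]
    have hguard : ∀ kv ∈ info,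
        (if kv.1 = f then none
         else (List.lookup kv.1 m').map (fun p' => g kv.1 p' kv.2))
          = (List.lookup kv.1 m').map (fun p' => g kv.1 p' kv.2) := by
      intro kv _
      by_cases h : kv.1 = f
      · rw [if_pos h, h, pv_lookup_none hf]
        rfl
      · rw [if_neg h]
    rw [List.filterMap_congr hrw]
    refine List.Perm.symm ?_
    refine (pv_extract f (fun v => g f p v)
      (fun kv => (List.lookup kv.1 m').map (fun p' => g kv.1 p' kv.2)) info hinfo).trans ?_
    rw [List.filterMap_congr hguard]
    have htail := (pv_join g m' info hm' hinfo).symm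
    cases hl : List.lookup f info with
    | none =>
      simpa [List.filterMap_cons, hl] using htail
    | some v =>
      simpa [List.filterMap_cons, hl] using htail.cons (g f p v)

-- the common sorted line list both programs produce
theorem pv_target_pairwise (info : List (String × String)) :
    (pvSortedCfg.filterMap (pvLine info)).Pairwise (· ≤ ·) := by
  refine List.Pairwise.filterMap _ ?_ pvSorted_diffB
  intro a a' h b hb b' hb'
  simp only [pvLine, Option.map_eq_some_iff] at hb hb'
  obtain ⟨v, -, rfl⟩ := hb
  obtain ⟨v', -, rfl⟩ := hb'
  have := pvDiffB_str h (" " ++ v) (" " ++ v')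
  calc a.2 ++ " " ++ v = a.2 ++ (" " ++ v) := by rw [String.append_assoc]
    _ ≤ a'.2 ++ (" " ++ v') := le_of_lt this
    _ = a'.2 ++ " " ++ v' := by rw [String.append_assoc]

-- B's sort of its dict-driven lines lands on the same sorted line list
theorem pv_sortB_eq (info : List (String × String)) (hnd : (info.map Prod.fst).Nodup) :
    PySem.List.sorted
        (info.filterMap (fun kv => (List.lookup kv.1 pv_cfgmap).map (fun p => p ++ " " ++ kv.2)))
        (fun x => x) false
      = pvSortedCfg.filterMap (pvLine info) := by
  refine PySem.List.sorted_id_eq_of_perm_of_pairwise _ _ ?_ (pv_target_pairwise info)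
  exact (pvSorted_perm.filterMap _).trans
    (pv_join (fun _ p v => p ++ " " ++ v) pv_cfgmap info pvCfg_keys_nodup hnd)

theorem ports_agree (render_tables : Option (List (String × List (String × List (List (String × String))))))
    (hpre : Pre_show_crm_config render_tables) :
    show_crm_config render_tables = show_crm_config_alt render_tables := by
  cases render_tables with
  | none => rfl
  | some rts =>
    cases h1 : List.lookup "sonic-system-crm:sonic-system-crm/CRM" rts with
    | none => simp only [show_crm_config, show_crm_config_alt, h1]; rfl
    | some crm =>
      cases h2 : List.lookup "CRM_LIST" crm with
      | none => simp only [show_crm_config, show_crm_config_alt, h1, h2]; rfl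
      | some lst =>
        cases lst with
        | nil => simp only [show_crm_config, show_crm_config_alt, h1, h2]; rfl
        | cons info rest =>
          have hnd : (info.map Prod.fst).Nodup := by
            have hp := hpre.1
            have hmem1 : ("sonic-system-crm:sonic-system-crm/CRM", crm) ∈ rts :=
              pv_mem_of_lookup h1
            have hmem2 : ("CRM_LIST", info :: rest) ∈ crm := pv_mem_of_lookup h2
            exact ((hp.2 _ hmem1).2 _ hmem2 info List.mem_cons_self)
          simp only [show_crm_config, show_crm_config_alt, h1, h2,
            PySem.List.pyGet?_zero_cons, Option.getD_some]
          by_cases hinfo : info = []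
          · subst hinfo
            rw [if_pos rfl]
            rfl
          · rw [if_neg hinfo, pvSorted_eq, loopA, List.nil_append,
              List.filterMap_congr (fun fp _ => line_eq info fp), ← pv_sortB_eq info hnd]

-- ===== VERDICT (by name: the statement is the Claim_ definition above) =====
theorem show_crm_config_spec : Claim_equal_show_crm_config := by
  intro rt _ hpre
  unfold Spec_show_crm_config
  exact ports_agree rt hpre

theorem show_crm_config_raises : Claim_raises_show_crm_config := by
  unfold Claim_raises_show_crm_config
  constructor
  · intro rt _ hr hp
    cases rt with
    | none => exact hr.1 rfl
    | some rts =>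
      obtain ⟨-, ⟨p, hpmem, hp1⟩, hall⟩ := hr
      simp only [Option.getD_some] at hpmem hall
      obtain ⟨⟨q, hqmem, hq1⟩, hempty⟩ := hall p hpmem hp1
      exact (hp.2 p hpmem hp1 q hqmem hq1) (hempty q hqmem hq1)
  · refine ⟨by decide, by decide, by decide⟩

-- self-check: the stated raise witness does lie in the raise region (reuses show_crm_config_raises)
theorem pvRaiseWitness_ok : Raises_show_crm_config pvRaiseWitness_show_crm_config :=
  show_crm_config_raises.2.2.1
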